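-- pv_equiv track=rewrite | github.com/pypi-data/pypi-mirror-386 | packages/openhcs/openhcs-0.3.3.tar.gz/openhcs-0.3.3/openhcs/runtime/zmq_base.py | collect_dimension_values
-- ===== SOURCE A (Python) =====
-- def collect_dimension_values(images, components):
--     """Collect unique dimension value tuples from images.
--
--     Args:
--         images: List of image data dicts with 'metadata' key
--         components: List of component names to collect
--
--     Returns:
--         Sorted list of unique value tuples
--     """
--     if not components:
--         return [()]
--
--     values = set()
--     for img_data in images:
--         meta = img_data['metadata']
--         # Fail loud if component missing from metadata
--         value_tuple = tuple(meta[comp] for comp in components)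
--         values.add(value_tuple)
--
--     return sorted(values)
-- ===== SOURCE B (Python) =====
-- def collect_dimension_values(images, components):
--     """Collect unique dimension value tuples from images.
--
--     Maintains a sorted, duplicate-free result list incrementally: each tuple
--     is placed by binary search (bisect_left by hand) and inserted only if
--     absent, so no final sort or separate dedup pass is needed.
--     """
--     if not components:
--         return [()]
--
--     result = []
--     for img_data in images:
--         meta = img_data['metadata']
--         # Fail loud if component missing from metadata
--         t = tuple(meta[comp] for comp in components)
--         lo, hi = 0, len(result)
--         while lo < hi:
--             mid = (lo + hi) // 2
--             if result[mid] < t: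
--                 lo = mid + 1
--             else:
--                 hi = mid
--         if lo == len(result) or result[lo] != t:
--             result.insert(lo, t)
--     return result
-- ===== Notes on version B (the rewrite author's own statement) =====
-- stated objective: alternative
-- what changed: Instead of accumulating tuples in a hash set and sorting at the end, B maintains a sorted duplicate-free result list throughout: each tuple is located by a hand-written binary search and inserted only if absent, so there is no set and no final sort.
import Mathlib
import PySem

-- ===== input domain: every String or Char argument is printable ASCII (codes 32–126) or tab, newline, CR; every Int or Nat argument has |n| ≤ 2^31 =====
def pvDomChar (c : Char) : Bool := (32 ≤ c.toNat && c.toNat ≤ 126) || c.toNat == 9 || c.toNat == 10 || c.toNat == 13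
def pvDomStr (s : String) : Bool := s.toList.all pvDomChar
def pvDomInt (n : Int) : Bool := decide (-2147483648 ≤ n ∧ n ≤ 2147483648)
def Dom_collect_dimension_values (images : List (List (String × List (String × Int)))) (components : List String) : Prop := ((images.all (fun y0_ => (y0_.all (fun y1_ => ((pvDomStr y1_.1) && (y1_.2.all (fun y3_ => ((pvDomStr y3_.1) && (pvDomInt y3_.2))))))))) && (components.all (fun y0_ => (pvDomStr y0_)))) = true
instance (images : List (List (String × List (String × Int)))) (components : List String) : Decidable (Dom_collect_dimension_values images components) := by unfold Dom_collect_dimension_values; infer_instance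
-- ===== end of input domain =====

-- B replaces A's hash-set-then-sort by incrementally maintaining a sorted duplicate-free
-- result list via hand-written binary search insertion (alternative algorithm, no final sort).


-- ===== PORT A =====
-- tuple(meta[comp] for comp in components); the getD defaults never fire under Pre_ (missing keys = KeyError are excluded there)
def pvTuple (components : List String) (img : List (String × List (String × Int))) : List Int :=
  components.map (fun c =>
    PySem.Dict.getD (PySem.Dict.mk (PySem.Dict.getD (PySem.Dict.mk img) "metadata" [])) c 0)

def collect_dimension_values (images : List (List (String × List (String × Int)))) (components : List String) : List (List Int) :=
  if components = [] then [[]]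
  else
    let values : PySem.Set (List Int) :=
      images.foldl (fun values img_data => values.add (pvTuple components img_data)) PySem.Set.empty
    PySem.List.sorted values (fun x => x)

-- ===== PORT B =====
-- B's inner while loop (hand-written bisect_left); lo, hi stay Nats in Python (0 ≤ lo ≤ hi ≤ len),
-- and mid is always in range, so Nat indices and getD are exact here.
def pvBisect (result : List (List Int)) (t : List Int) (lo hi : Nat) : Nat :=
  if lo < hi then
    let mid := (lo + hi) / 2
    if result.getD mid [] < t then pvBisect result t (mid + 1) hi
    else pvBisect result t lo mid
  else lo
termination_by hi - lo
decreasing_by all_goals omega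

-- B's loop body: find the insertion point, insert t only if absent
-- (result[lo] is only read when lo < len(result), as Python's 'or' short-circuits)
def pvOrdStep (result : List (List Int)) (t : List Int) : List (List Int) :=
  let lo := pvBisect result t 0 result.length
  if lo = result.length ∨ result.getD lo [] ≠ t then PySem.List.insert result (lo : Int) t
  else result

def collect_dimension_values_alt (images : List (List (String × List (String × Int)))) (components : List String) : List (List Int) :=
  if components = [] then [[]]
  else
    images.foldl (fun result img_data => pvOrdStep result (pvTuple components img_data)) []

-- ===== PRECONDITION & SPEC =====
-- Pre_ excludes exactly the inputs where A raises KeyError: some image lacks the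
-- 'metadata' key, or some requested component is missing from an image's metadata
-- (irrelevant when components is empty, where A returns before the loop).
def Pre_collect_dimension_values (images : List (List (String × List (String × Int)))) (components : List String) : Prop :=
  components = [] ∨
    images.all (fun img_data =>
      ((PySem.Dict.get? (PySem.Dict.mk img_data) "metadata").map
        (fun md => components.all (fun c => PySem.Dict.contains (PySem.Dict.mk md) c))).getD false) = true
instance (images : List (List (String × List (String × Int)))) (components : List String) : Decidable (Pre_collect_dimension_values images components) := by unfold Pre_collect_dimension_values; infer_instance

def pvWitness_collect_dimension_values : (List (List (String × List (String × Int)))) × List String :=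
  ([[("metadata", [("x", 1), ("y", 2)])], [("metadata", [("x", 0), ("y", 2)])]], ["x", "y"])

def Spec_collect_dimension_values (images : List (List (String × List (String × Int)))) (components : List String) (out : List (List Int)) : Prop := out = collect_dimension_values_alt images components
instance (images : List (List (String × List (String × Int)))) (components : List String) (out : List (List Int)) : Decidable (Spec_collect_dimension_values images components out) := by unfold Spec_collect_dimension_values; infer_instance

-- ===== CLAIM (what is proved, stated in full; the proofs are below) =====
def Claim_equal_collect_dimension_values : Prop := ∀ (images : List (List (String × List (String × Int)))) (components : List String), Dom_collect_dimension_values images components → Pre_collect_dimension_values images components → Spec_collect_dimension_values images components (collect_dimension_values images components)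

-- ===== LEMMAS AND PROOFS =====

-- the elaborator's default order instances on List ℤ agree with the LinearOrder ones the sort lemmas use
theorem pvSortedConv (xs : List (List ℤ)) :
    @PySem.List.sorted (List ℤ) (List ℤ) List.instLT (fun a b => a.decidableLT b) xs (fun x => x) false
  = @PySem.List.sorted (List ℤ) (List ℤ) Preorder.toLT LinearOrder.toDecidableLT xs (fun x => x) false := by
  congr 1

-- monotonicity of a (≤)-pairwise list by index
theorem pvMono (l : List (List Int)) (h : l.Pairwise (· ≤ ·)) :
    ∀ i j, i ≤ j → j < l.length → l.getD i [] ≤ l.getD j [] := by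
  intro i j hij hj
  rcases Nat.lt_or_ge i j with hlt | hge
  · have := List.pairwise_iff_getElem.1 h i j (lt_of_lt_of_le hlt (le_of_lt hj)) hj hlt
    simpa [List.getD_eq_getElem?_getD, List.getElem?_eq_getElem, lt_of_lt_of_le hlt (le_of_lt hj), hj] using this
  · have : i = j := le_antisymm hij hge
    simp [this]

-- bisect returns the first index whose element is not < t
theorem pvBisect_spec (result : List (List Int)) (t : List Int)
    (hs : result.Pairwise (· ≤ ·)) :
    ∀ n lo hi, hi - lo ≤ n → lo ≤ hi → hi ≤ result.length →
    (∀ i, i < lo → result.getD i [] < t) →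
    (∀ i, hi ≤ i → i < result.length → ¬ result.getD i [] < t) →
    lo ≤ pvBisect result t lo hi ∧ pvBisect result t lo hi ≤ hi ∧
    (∀ i, i < pvBisect result t lo hi → result.getD i [] < t) ∧
    (∀ i, pvBisect result t lo hi ≤ i → i < result.length → ¬ result.getD i [] < t) := by
  intro n
  induction n with
  | zero =>
    intro lo hi hn hle hhi hlow hhigh
    have : lo = hi := by omega
    subst this
    rw [pvBisect]
    simp only [lt_irrefl, if_false]
    exact ⟨le_refl _, le_refl _, hlow, hhigh⟩
  | succ n ih =>
    intro lo hi hn hle hhi hlow hhigh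
    rw [pvBisect]
    by_cases h : lo < hi
    · simp only [if_pos h]
      set mid := (lo + hi) / 2 with hmid
      have hmlo : lo ≤ mid := by omega
      have hmhi : mid < hi := by omega
      by_cases hc : result.getD mid [] < t
      · simp only [if_pos hc]
        refine (ih (mid + 1) hi (by omega) (by omega) hhi ?_ hhigh).imp (by omega) id
        intro i hi'
        exact lt_of_le_of_lt (pvMono result hs i mid (by omega) (by omega)) hc
      · simp only [if_neg hc]
        refine (ih lo mid (by omega) (by omega) (by omega) hlow ?_).imp id (fun h2 => ⟨by omega, h2.2⟩)
        intro i hmi hilen hcon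
        exact hc (lt_of_le_of_lt (pvMono result hs mid i hmi hilen) hcon)
    · simp only [if_neg h]
      have : lo = hi := by omega
      subst this
      exact ⟨le_refl _, le_refl _, hlow, hhigh⟩

-- one B step preserves strict sortedness and adds t to the members
theorem pvOrdStep_spec (result : List (List Int)) (t : List Int)
    (h : result.Pairwise (· < ·)) :
    (pvOrdStep result t).Pairwise (· < ·) ∧
    (∀ x, x ∈ pvOrdStep result t ↔ x ∈ result ∨ x = t) := by
  have hle : result.Pairwise (· ≤ ·) := h.imp le_of_lt
  obtain ⟨h0, hlen, hlt, hge⟩ :=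
    pvBisect_spec result t hle result.length 0 result.length (le_refl _) (Nat.zero_le _)
      (le_refl _) (by intro i hi; omega) (by intro i hi hi2; omega)
  set lo := pvBisect result t 0 result.length with hlo
  unfold pvOrdStep
  rw [← hlo]
  by_cases hcase : lo = result.length ∨ result.getD lo [] ≠ t
  · simp only [if_pos hcase]
    rw [PySem.List.insert_natCast result lo t hlen]
    have htlt : ∀ x ∈ result.take lo, x < t := by
      intro x hx
      obtain ⟨i, hi, hival⟩ := List.mem_take_iff_getElem.1 hx
      have : result.getD i [] = x := by
        simp [List.getD_eq_getElem?_getD, List.getElem?_eq_getElem (by omega : i < result.length), hival]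
      exact this ▸ hlt i (by omega)
    have httlt : ∀ x ∈ result.drop lo, t < x := by
      intro x hx
      obtain ⟨i, hi, hival⟩ := List.mem_iff_getElem.1 hx
      rw [List.getElem_drop] at hival
      have hloi : lo + i < result.length := by
        have := List.length_drop (l := result) (i := lo); omega
      have hxd : result.getD (lo + i) [] = x := by
        simp [List.getD_eq_getElem?_getD, List.getElem?_eq_getElem hloi, hival]
      have hnotlt : ¬ x < t := hxd ▸ hge (lo + i) (by omega) hloi
      have hne : x ≠ t := by
        intro hxe
        subst hxe
        rcases hcase with hc | hc
        · omega
        · rcases Nat.eq_zero_or_pos i with hz | hz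
          · subst hz
            exact hc (by simpa using hxd)
          · have hstrict : result.getD lo [] < result.getD (lo + i) [] := by
              have := List.pairwise_iff_getElem.1 h lo (lo + i) (by omega) hloi (by omega)
              simpa [List.getD_eq_getElem?_getD, List.getElem?_eq_getElem,
                (by omega : lo < result.length), hloi] using this
            exact hge lo (le_refl _) (by omega) (hxd ▸ hstrict)
      exact lt_of_le_of_ne (not_lt.1 hnotlt) (Ne.symm hne)
    constructor
    · rw [List.pairwise_append]
      refine ⟨h.sublist (List.take_sublist _ _), ?_, ?_⟩
      · refine List.pairwise_cons.2 ⟨fun x hx => httlt x hx, h.sublist (List.drop_sublist _ _)⟩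
      · intro x hx y hy
        rcases List.mem_cons.1 hy with rfl | hy'
        · exact htlt x hx
        · exact lt_trans (htlt x hx) (httlt y hy')
    · intro x
      constructor
      · intro hx
        rcases List.mem_append.1 hx with hx | hx
        · exact Or.inl (List.mem_of_mem_take hx)
        · rcases List.mem_cons.1 hx with rfl | hx'
          · exact Or.inr rfl
          · exact Or.inl (List.mem_of_mem_drop hx')
      · intro hx
        rcases hx with hx | rfl
        · conv at hx => rw [← List.take_append_drop lo result]
          rcases List.mem_append.1 hx with hx | hx
          · exact List.mem_append_left _ hx
          · exact List.mem_append_right _ (List.mem_cons_of_mem _ hx)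
        · exact List.mem_append_right _ List.mem_cons_self
  · simp only [if_neg hcase]
    push Not at hcase
    obtain ⟨hne, heq⟩ := hcase
    have hlolen : lo < result.length := lt_of_le_of_ne hlen hne
    have htmem : t ∈ result := by
      have : result.getD lo [] = result[lo] := by
        simp [List.getD_eq_getElem?_getD, List.getElem?_eq_getElem hlolen]
      rw [← heq, this]
      exact List.getElem_mem _
    refine ⟨h, fun x => ⟨Or.inl, ?_⟩⟩
    rintro (hx | rfl)
    · exact hx
    · exact htmem

-- fold invariant: the accumulator stays strictly sorted, members = acc ∪ processed tuples
theorem pvFold_inv (f : List (String × List (String × Int)) → List Int)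
    (imgs : List (List (String × List (String × Int)))) :
    ∀ acc, acc.Pairwise (· < ·) →
    (imgs.foldl (fun result img_data => pvOrdStep result (f img_data)) acc).Pairwise (· < ·) ∧
    (∀ x, x ∈ imgs.foldl (fun result img_data => pvOrdStep result (f img_data)) acc ↔
      x ∈ acc ∨ x ∈ imgs.map f) := by
  induction imgs with
  | nil => intro acc hacc; simpa using hacc
  | cons a l ih =>
    intro acc hacc
    obtain ⟨h1, h2⟩ := pvOrdStep_spec acc (f a) hacc
    obtain ⟨h3, h4⟩ := ih (pvOrdStep acc (f a)) h1
    refine ⟨h3, fun x => ?_⟩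
    simp only [List.foldl_cons] at *
    rw [h4 x, h2 x]
    simp only [List.map_cons, List.mem_cons]
    tauto

-- ===== VERDICT (by name: the statement is the Claim_ definition above) =====
theorem collect_dimension_values_spec : Claim_equal_collect_dimension_values := by
  intro images components _ _
  unfold Spec_collect_dimension_values collect_dimension_values collect_dimension_values_alt
  by_cases hc : components = []
  · simp [hc]
  · simp only [if_neg hc]
    have hA : images.foldl (fun values img_data => values.add (pvTuple components img_data)) PySem.Set.empty
        = PySem.Set.ofList (images.map (pvTuple components)) := by
      rw [← PySem.Set.update_map_eq_foldl_add]
      rfl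
    rw [hA, pvSortedConv]
    obtain ⟨hpw, hmem⟩ := pvFold_inv (pvTuple components) images [] List.Pairwise.nil
    apply PySem.List.sorted_eq_of_perm_of_pairwise_lt
    · have hnd : (images.foldl (fun result img_data => pvOrdStep result (pvTuple components img_data)) []).Nodup :=
        hpw.imp (fun h => ne_of_lt h)
      refine (List.perm_ext_iff_of_nodup hnd (PySem.Set.nodup_ofList _)).2 ?_
      intro x
      rw [PySem.Set.mem_ofList, hmem x]
      simp
    · exact hpw
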